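-- pv_equiv track=rewrite | github.com/niwatorinoko/My-Algo-Solutions | Easy/747.py | dominantIndex
-- ===== SOURCE A (Python) =====
-- from typing import List
--
-- def dominantIndex(nums: List[int]) -> int:
--     max_index = nums.index(max(nums))
--     for i in range(len(nums)):
--         if i == max_index:
--             continue
--         elif nums[i]*2 > nums[max_index]:
--             return -1
--     return max_index
-- ===== SOURCE B (Python) =====
-- from typing import List
--
-- def dominantIndex(nums: List[int]) -> int:
--     # single pass: track largest value (with its first index) and second largest
--     best = nums[0]
--     best_i = 0
--     second = None
--     for i in range(1, len(nums)):
--         v = nums[i]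
--         if v > best:
--             second = best
--             best = v
--             best_i = i
--         elif second is None or v > second:
--             second = v
--     if second is None or best >= 2 * second:
--         return best_i
--     return -1
-- ===== Notes on version B (the rewrite author's own statement) =====
-- stated objective: alternative
-- what changed: Replaces A's three-phase structure (compute max, find its index, then a verification loop with repeated indexing) by a single top-two scan that keeps the largest value, its first index and the second-largest value, deciding with one final comparison.
-- outside the precondition, e.g. on dominantIndex([]): A raises ValueError, B raises IndexError
import Mathlib
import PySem

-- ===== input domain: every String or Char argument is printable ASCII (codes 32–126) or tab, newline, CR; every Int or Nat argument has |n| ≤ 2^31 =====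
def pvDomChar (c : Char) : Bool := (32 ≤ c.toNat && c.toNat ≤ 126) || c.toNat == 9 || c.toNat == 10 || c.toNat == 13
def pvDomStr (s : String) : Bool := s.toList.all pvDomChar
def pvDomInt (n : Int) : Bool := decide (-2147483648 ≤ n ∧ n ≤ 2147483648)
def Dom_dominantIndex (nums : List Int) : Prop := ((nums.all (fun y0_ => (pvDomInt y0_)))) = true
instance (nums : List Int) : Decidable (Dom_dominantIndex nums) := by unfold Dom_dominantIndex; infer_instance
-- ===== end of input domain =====

-- B replaces A's three passes (max, index, verification loop) by one single top-two scan; same return values.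


-- ===== PORT A =====
-- the 'for i in range(len(nums))' loop, iterating over the enumerated list; maxVal = nums[max_index]
def pvAGo (maxIdx maxVal : Int) : List (Int × Int) → Int
  | [] => maxIdx
  | (i, v) :: rest =>
    if i = maxIdx then pvAGo maxIdx maxVal rest
    else if v * 2 > maxVal then -1
    else pvAGo maxIdx maxVal rest

def dominantIndex (nums : List Int) : Int :=
  match PySem.List.max? nums (fun y => y) with
  | none => 0  -- unreachable: Python's max([]) raises ValueError; Pre_ excludes []
  | some m =>
    match PySem.List.index? nums m with
    | none => 0  -- unreachable: m ∈ nums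
    | some k => pvAGo (Int.ofNat k) m (PySem.List.enumerate nums)

-- ===== PORT B =====
-- single pass keeping (best, its first index, second-best); second = none until a second element is seen
def pvBGo (bestI best : Int) (second : Option Int) : List (Int × Int) → Int
  | [] =>
    match second with
    | none => bestI
    | some s => if best ≥ 2 * s then bestI else -1
  | (i, v) :: rest =>
    if v > best then pvBGo i v (some best) rest
    else
      match second with
      | none => pvBGo bestI best (some v) rest
      | some s => if v > s then pvBGo bestI best (some v) rest else pvBGo bestI best (some s) rest

def dominantIndex_alt (nums : List Int) : Int :=
  match nums with
  | [] => 0  -- unreachable: nums[0] raises IndexError; Pre_ excludes []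
  | h :: t => pvBGo 0 h none (PySem.List.enumerate t 1)

-- ===== PRECONDITION & SPEC =====
-- Pre_ excludes only the empty list, on which both A (max([])) and B (nums[0]) raise.
def Pre_dominantIndex (nums : List Int) : Prop := nums ≠ []
instance (nums : List Int) : Decidable (Pre_dominantIndex nums) := by unfold Pre_dominantIndex; infer_instance
def pvWitness_dominantIndex : List Int := [3, 1, 6]

def Spec_dominantIndex (nums : List Int) (out : Int) : Prop := out = dominantIndex_alt nums
instance (nums : List Int) (out : Int) : Decidable (Spec_dominantIndex nums out) := by unfold Spec_dominantIndex; infer_instance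

-- ===== CLAIM (what is proved, stated in full; the proofs are below) =====
def Claim_equal_dominantIndex : Prop := ∀ (nums : List Int), Dom_dominantIndex nums → Pre_dominantIndex nums → Spec_dominantIndex nums (dominantIndex nums)

-- ===== LEMMAS AND PROOFS =====

-- the running max, its first index, the remaining elements, and the second-largest value of h :: t
def topVal (h : Int) (t : List Int) : Int := List.foldl max h t
def topIdx (h : Int) (t : List Int) : Nat := (PySem.List.index? (h :: t) (topVal h t)).getD 0
def others (h : Int) (t : List Int) : List Int := (h :: t).eraseIdx (topIdx h t)
def sec? (h : Int) (t : List Int) : Option Int :=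
  match others h t with
  | [] => none
  | x :: xs => some (List.foldl max x xs)

def finalB (h : Int) (t : List Int) : Int :=
  match sec? h t with
  | none => (topIdx h t : Int)
  | some s => if topVal h t ≥ 2 * s then (topIdx h t : Int) else -1

theorem topVal_mem (h : Int) (t : List Int) : topVal h t ∈ h :: t := by
  induction t generalizing h with
  | nil => simp [topVal]
  | cons x xs ih =>
    have he : topVal h (x :: xs) = topVal (max h x) xs := by simp [topVal]
    rw [he]
    rcases List.mem_cons.mp (ih (max h x)) with hm | hm
    · rw [hm]
      rcases max_choice h x with hc | hc <;> rw [hc] <;> simp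
    · simp [hm]

theorem le_topVal (h : Int) (t : List Int) : ∀ y ∈ h :: t, y ≤ topVal h t := by
  intro y hy
  rcases List.mem_cons.mp hy with rfl | hm
  · exact (PySem.List.le_foldl_max t y).1
  · exact (PySem.List.le_foldl_max t h).2 y hm

theorem index?_topVal (h : Int) (t : List Int) :
    PySem.List.index? (h :: t) (topVal h t) = some (topIdx h t) := by
  have hs : (PySem.List.index? (h :: t) (topVal h t)).isSome = true :=
    (PySem.List.index?_isSome_iff _ _).mpr (topVal_mem h t)
  rcases Option.isSome_iff_exists.mp hs with ⟨k, hk⟩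
  unfold topIdx
  rw [hk]
  rfl

theorem topIdx_lt (h : Int) (t : List Int) : topIdx h t < (h :: t).length := by
  rcases (PySem.List.index?_eq_some_iff _ _ _).mp (index?_topVal h t) with ⟨pre, suf, he, hlen, _⟩
  have : (h :: t).length = pre.length + suf.length + 1 := by
    rw [he]; simp; omega
  omega

-- step lemmas for the new-max case (v > topVal h t)
theorem topVal_append_gt (h v : Int) (t : List Int) (hv : topVal h t < v) :
    topVal h (t ++ [v]) = v := by
  simp [topVal, List.foldl_append]
  exact le_of_lt hv

theorem not_mem_of_gt (h v : Int) (t : List Int) (hv : topVal h t < v) : v ∉ h :: t := by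
  intro hm
  exact absurd (le_topVal h t v hm) (not_le.mpr hv)

theorem topIdx_append_gt (h v : Int) (t : List Int) (hv : topVal h t < v) :
    topIdx h (t ++ [v]) = t.length + 1 := by
  have h1 : topVal h (t ++ [v]) = v := topVal_append_gt h v t hv
  have h2 : PySem.List.index? ((h :: t) ++ [v]) v = some (h :: t).length :=
    PySem.List.index?_append_singleton_self (h :: t) v (not_mem_of_gt h v t hv)
  unfold topIdx
  rw [h1, show (h :: (t ++ [v])) = (h :: t) ++ [v] from rfl, h2]
  simp

theorem sec?_append_gt (h v : Int) (t : List Int) (hv : topVal h t < v) :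
    sec? h (t ++ [v]) = some (topVal h t) := by
  have h1 : topIdx h (t ++ [v]) = t.length + 1 := topIdx_append_gt h v t hv
  have h2 : others h (t ++ [v]) = h :: t := by
    have : (h :: (t ++ [v])) = (h :: t) ++ [v] := by simp
    rw [others, h1, this]
    rw [List.eraseIdx_append_of_length_le (by simp)]
    simp
  simp [sec?, h2, topVal]

-- step lemmas for the no-new-max case (v ≤ topVal h t)
theorem topVal_append_le (h v : Int) (t : List Int) (hv : v ≤ topVal h t) :
    topVal h (t ++ [v]) = topVal h t := by
  simp [topVal, List.foldl_append]
  exact hv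

theorem topIdx_append_le (h v : Int) (t : List Int) (hv : v ≤ topVal h t) :
    topIdx h (t ++ [v]) = topIdx h t := by
  have h1 := topVal_append_le h v t hv
  have h2 : PySem.List.index? ((h :: t) ++ [v]) (topVal h t) = PySem.List.index? (h :: t) (topVal h t) :=
    PySem.List.index?_append_of_mem [v] (topVal_mem h t)
  unfold topIdx
  rw [h1, show (h :: (t ++ [v])) = (h :: t) ++ [v] from rfl, h2]

theorem others_append_le (h v : Int) (t : List Int) (hv : v ≤ topVal h t) :
    others h (t ++ [v]) = others h t ++ [v] := by
  have h1 := topIdx_append_le h v t hv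
  have : (h :: (t ++ [v])) = (h :: t) ++ [v] := by simp
  rw [others, h1, this, List.eraseIdx_append_of_lt_length (topIdx_lt h t)]
  rfl

theorem sec?_append_le (h v : Int) (t : List Int) (hv : v ≤ topVal h t) :
    sec? h (t ++ [v]) = some (match sec? h t with | none => v | some s => max s v) := by
  rw [sec?, others_append_le h v t hv]
  cases ho : others h t with
  | nil => simp [sec?, ho]
  | cons x xs => simp [sec?, ho, List.foldl_append]

-- B's loop computes finalB
theorem bGo_main (rest : List Int) : ∀ (t : List Int) (h : Int),
    pvBGo (topIdx h t : Int) (topVal h t) (sec? h t) (PySem.List.enumerate rest (1 + t.length)) =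
      finalB h (t ++ rest) := by
  induction rest with
  | nil => intro t h; simp [PySem.List.enumerate, pvBGo, finalB]
  | cons v rest ih =>
    intro t h
    rw [PySem.List.enumerate_cons]
    simp only [pvBGo]
    by_cases hv : v > topVal h t
    · rw [if_pos hv]
      have H := ih (t ++ [v]) h
      rw [topVal_append_gt h v t hv, topIdx_append_gt h v t hv, sec?_append_gt h v t hv] at H
      have hn : ((t.length + 1 : Nat) : Int) = 1 + (t.length : Int) := by push_cast; ring
      have hn2 : (1 : Int) + ((t ++ [v]).length : Int) = 1 + (t.length : Int) + 1 := by
        simp; ring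
      rw [hn, hn2, List.append_assoc] at H
      simpa using H
    · push_neg at hv
      have e1 := (topVal_append_le h v t hv).symm
      have e2 : (topIdx h t : Int) = (topIdx h (t ++ [v]) : Int) := by
        rw [topIdx_append_le h v t hv]
      have e4 : (1 + (t.length : Int)) + 1 = 1 + ((t ++ [v]).length : Int) := by simp; ring
      rw [if_neg (not_lt.mpr hv)]
      have key : ∀ snd, snd = sec? h (t ++ [v]) →
          pvBGo (topIdx h t : Int) (topVal h t) snd (PySem.List.enumerate rest (1 + (t.length : Int) + 1)) = finalB h (t ++ v :: rest) := by
        intro snd hsnd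
        rw [hsnd, e2]
        conv_lhs => rw [e1, e4]
        rw [ih (t ++ [v]) h]
        simp
      cases hs : sec? h t with
      | none => exact key _ (by rw [sec?_append_le h v t hv, hs])
      | some s =>
        dsimp only
        by_cases hvs : v > s
        · rw [if_pos hvs]
          exact key _ (by rw [sec?_append_le h v t hv, hs]; simp [max_eq_right (le_of_lt hvs)])
        · rw [if_neg hvs]
          exact key _ (by rw [sec?_append_le h v t hv, hs]; simp [max_eq_left (not_lt.mp hvs)])

theorem alt_eq_finalB (h : Int) (t : List Int) : dominantIndex_alt (h :: t) = finalB h t := by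
  have := bGo_main t [] h
  simpa [topVal, topIdx, sec?, others, PySem.List.index?, finalB] using this

-- A's loop is the universally-quantified test
theorem aGo_char (l : List (Int × Int)) (k m : Int) :
    pvAGo k m l = if ∀ p ∈ l, p.1 = k ∨ p.2 * 2 ≤ m then k else -1 := by
  induction l with
  | nil => simp [pvAGo]
  | cons p rest ih =>
    obtain ⟨i, v⟩ := p
    rw [pvAGo]
    by_cases hik : i = k
    · rw [if_pos hik, ih]
      by_cases hall : ∀ p ∈ rest, p.1 = k ∨ p.2 * 2 ≤ m
      · rw [if_pos hall, if_pos]; intro p hp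
        rcases List.mem_cons.mp hp with rfl | hm
        · exact Or.inl hik
        · exact hall p hm
      · rw [if_neg hall, if_neg]; intro hc; exact hall fun p hp => hc p (List.mem_cons_of_mem _ hp)
    · rw [if_neg hik]
      by_cases hv : v * 2 > m
      · rw [if_pos hv, if_neg]
        intro hc
        rcases hc (i, v) (List.mem_cons_self) with h1 | h2
        · exact hik h1
        · exact absurd h2 (not_le.mpr hv)
      · rw [if_neg hv, ih]
        by_cases hall : ∀ p ∈ rest, p.1 = k ∨ p.2 * 2 ≤ m
        · rw [if_pos hall, if_pos]; intro p hp
          rcases List.mem_cons.mp hp with rfl | hm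
          · exact Or.inr (not_lt.mp hv)
          · exact hall p hm
        · rw [if_neg hall, if_neg]; intro hc; exact hall fun p hp => hc p (List.mem_cons_of_mem _ hp)

-- membership in eraseIdx ↔ an index different from k
theorem mem_eraseIdx_iff (l : List Int) (k : Nat) (hk : k < l.length) (v : Int) :
    v ∈ l.eraseIdx k ↔ ∃ j, ∃ hj : j < l.length, j ≠ k ∧ l[j] = v := by
  constructor
  · intro hm
    rcases List.mem_iff_getElem.mp hm with ⟨i, hi, he⟩
    rw [List.getElem_eraseIdx] at he
    by_cases hik : i < k
    · exact ⟨i, by simp [List.length_eraseIdx, hk] at hi; omega, by omega, by rw [← he]; simp [hik]⟩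
    · refine ⟨i + 1, by simp [List.length_eraseIdx, hk] at hi; omega, by omega, ?_⟩
      rw [← he]; simp [hik]
  · rintro ⟨j, hj, hjk, he⟩
    apply List.mem_iff_getElem.mpr
    by_cases hlt : j < k
    · refine ⟨j, by simp [List.length_eraseIdx, hk]; omega, ?_⟩
      rw [List.getElem_eraseIdx]; simp [hlt, he]
    · refine ⟨j - 1, by simp [List.length_eraseIdx, hk]; omega, ?_⟩
      rw [List.getElem_eraseIdx]
      have : ¬ (j - 1 < k) := by omega
      simp only [this, dif_neg, not_false_iff]
      have : j - 1 + 1 = j := by omega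
      simp [this, he]

-- A's test over the enumerated list ↔ the test over `others`
theorem cond_iff (h : Int) (t : List Int) (m : Int) :
    (∀ p ∈ PySem.List.enumerate (h :: t), p.1 = (topIdx h t : Int) ∨ p.2 * 2 ≤ m) ↔
      (∀ v ∈ others h t, v * 2 ≤ m) := by
  constructor
  · intro hall v hv
    rcases (mem_eraseIdx_iff (h :: t) (topIdx h t) (topIdx_lt h t) v).mp hv with ⟨j, hj, hjk, he⟩
    have hp : ((j : Int), (h :: t)[j]) ∈ PySem.List.enumerate (h :: t) := by
      rw [PySem.List.mem_enumerate_iff]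
      exact ⟨j, hj, by simp⟩
    rcases hall _ hp with h1 | h2
    · simp only [Nat.cast_inj] at h1
      exact absurd h1 hjk
    · rw [← he]; exact h2
  · intro hall p hp
    rcases (PySem.List.mem_enumerate_iff _ _ _).mp hp with ⟨j, hj, rfl⟩
    by_cases hjk : j = topIdx h t
    · left; simp [hjk]
    · right
      exact hall _ ((mem_eraseIdx_iff (h :: t) (topIdx h t) (topIdx_lt h t) _).mpr ⟨j, hj, hjk, rfl⟩)

theorem a_eq_finalB (h : Int) (t : List Int) : dominantIndex (h :: t) = finalB h t := by
  rw [dominantIndex]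
  rw [PySem.List.max?_id_cons]
  have hi : PySem.List.index? (h :: t) (topVal h t) = some (topIdx h t) := index?_topVal h t
  simp only [show List.foldl max h t = topVal h t from rfl, hi]
  rw [aGo_char]
  rw [show (Int.ofNat (topIdx h t)) = ((topIdx h t : Nat) : Int) from rfl]
  simp only [cond_iff h t (topVal h t)]
  cases ho : others h t with
  | nil => simp [finalB, sec?, ho]
  | cons x xs =>
    have hmem : List.foldl max x xs ∈ x :: xs := topVal_mem x xs
    by_cases hc : ∀ v ∈ x :: xs, v * 2 ≤ topVal h t
    · rw [if_pos hc]
      have hs : List.foldl max x xs * 2 ≤ topVal h t := hc _ hmem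
      simp [finalB, sec?, ho]
      omega
    · rw [if_neg hc]
      push_neg at hc
      rcases hc with ⟨v, hv, hgt⟩
      have hle : v ≤ List.foldl max x xs := le_topVal x xs v hv
      have : ¬ (topVal h t ≥ 2 * List.foldl max x xs) := by omega
      simp [finalB, sec?, ho, this]

-- ===== VERDICT (by name: the statement is the Claim_ definition above) =====
theorem dominantIndex_spec : Claim_equal_dominantIndex := by
  intro nums _ hpre
  unfold Spec_dominantIndex
  match nums with
  | [] => exact absurd rfl hpre
  | h :: t => rw [a_eq_finalB, alt_eq_finalB]
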